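-- pv_equiv track=rewrite | github.com/alexfmonteiro/veredas | agents/insight/agent.py | _format_anomaly_prompt_data
-- ===== SOURCE A (Python) =====
-- from collections import defaultdict
--
-- def _format_anomaly_prompt_data(anomalies: list[str]) -> str:
--     """Format anomalies grouped by series for the prompt."""
--     parts: list[str] = [f"Total anomalies detected: {len(anomalies)}", ""]
--
--     by_series: dict[str, list[str]] = defaultdict(list)
--     for a in anomalies:
--         series_name = a.split(" on ")[0] if " on " in a else "unknown"
--         by_series[series_name].append(a)
--
--     for series_name, items in sorted(by_series.items()):
--         parts.append(f"## {series_name}")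
--         for item in items:
--             parts.append(f"  - {item}")
--         parts.append("")
--
--     return "\n".join(parts)
-- ===== SOURCE B (Python) =====
-- def _format_anomaly_prompt_data(anomalies: list[str]) -> str:
--     """Format anomalies grouped by series for the prompt (sort-then-scan)."""
--     pairs = sorted(((a.split(" on ")[0] if " on " in a else "unknown", a) for a in anomalies),
--                    key=lambda p: p[0])
--     lines = [f"Total anomalies detected: {len(anomalies)}", ""]
--     prev = None
--     for k, a in pairs:
--         if prev != k:
--             if prev is not None:
--                 lines.append("")
--             lines.append(f"## {k}")
--             prev = k
--         lines.append(f"  - {a}")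
--     if prev is not None:
--         lines.append("")
--     return "\n".join(lines)
-- ===== Notes on version B (the rewrite author's own statement) =====
-- stated objective: alternative
-- what changed: A groups anomalies into a defaultdict keyed by series and then formats sorted(items()); B instead stably sorts the (series-key, anomaly) pairs once and emits headers/items/blank lines in a single scan that tracks the previous key.
import Mathlib
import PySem

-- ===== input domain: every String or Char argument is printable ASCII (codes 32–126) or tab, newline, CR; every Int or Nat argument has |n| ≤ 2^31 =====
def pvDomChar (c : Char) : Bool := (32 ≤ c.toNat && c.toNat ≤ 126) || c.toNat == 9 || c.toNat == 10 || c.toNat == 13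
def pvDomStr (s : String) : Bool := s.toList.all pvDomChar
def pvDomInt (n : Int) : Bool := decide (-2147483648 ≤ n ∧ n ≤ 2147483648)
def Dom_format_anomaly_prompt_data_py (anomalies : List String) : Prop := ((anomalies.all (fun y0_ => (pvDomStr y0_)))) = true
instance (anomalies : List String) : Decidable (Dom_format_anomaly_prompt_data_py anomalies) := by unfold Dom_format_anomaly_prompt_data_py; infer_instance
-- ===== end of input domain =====

-- B replaces A's defaultdict-grouping + sorted(items) double pass by a single stable
-- sort of (series-key, anomaly) pairs scanned once with a previous-key tracker
-- (objective: alternative decomposition, same cost).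

-- ===== PORT A =====
-- shared helper: BOTH Pythons contain the expression
--   a.split(" on ")[0] if " on " in a else "unknown"
-- a.split(sep) is never empty, so the [0] index never raises; the .getD default is dead.
def pvKey (a : String) : String :=
  if PySem.Str.isIn " on " a then
    (PySem.List.pyGet? ((PySem.Str.split? a " on ").getD []) 0).getD ""
  else "unknown"

def format_anomaly_prompt_data_py (anomalies : List String) : String :=
  let parts : List String :=
    ["Total anomalies detected: " ++ PySem.Int.toStr (Int.ofNat anomalies.length), ""]
  let bySeries : PySem.Dict String (List String) :=
    anomalies.foldl (fun d a => d.modify (pvKey a) [] (fun l => l ++ [a])) PySem.Dict.empty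
  -- sorted(by_series.items()): dict keys are distinct, so Python's tuple comparison
  -- never reaches the second component — sorting by the first component is exact here.
  let parts :=
    (PySem.List.sorted bySeries.items (fun p => p.1) false).foldl
      (fun ps p =>
        (p.2.foldl (fun ps2 item => ps2 ++ ["  - " ++ item]) (ps ++ ["## " ++ p.1])) ++ [""])
      parts
  PySem.Str.join "\n" parts

-- ===== PORT B =====
def pvStepB (st : List String × Option String) (p : String × String) :
    List String × Option String :=
  if st.2 ≠ some p.1 then
    (((if st.2.isSome then st.1 ++ [""] else st.1) ++ ["## " ++ p.1]) ++ ["  - " ++ p.2],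
     some p.1)
  else (st.1 ++ ["  - " ++ p.2], st.2)

def format_anomaly_prompt_data_py_alt (anomalies : List String) : String :=
  let pairs :=
    PySem.List.sorted (anomalies.map (fun a => (pvKey a, a))) (fun p => p.1) false
  let st := pairs.foldl pvStepB
    (["Total anomalies detected: " ++ PySem.Int.toStr (Int.ofNat anomalies.length), ""], none)
  PySem.Str.join "\n" (if st.2.isSome then st.1 ++ [""] else st.1)

-- ===== PRECONDITION & SPEC =====
def Spec_format_anomaly_prompt_data_py (anomalies : List String) (out : String) : Prop := out = format_anomaly_prompt_data_py_alt anomalies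
instance (anomalies : List String) (out : String) : Decidable (Spec_format_anomaly_prompt_data_py anomalies out) := by unfold Spec_format_anomaly_prompt_data_py; infer_instance

-- ===== CLAIM (what is proved, stated in full; the proofs are below) =====
def Claim_equal_format_anomaly_prompt_data_py : Prop := ∀ (anomalies : List String), Dom_format_anomaly_prompt_data_py anomalies → Spec_format_anomaly_prompt_data_py anomalies (format_anomaly_prompt_data_py anomalies)

-- ===== LEMMAS AND PROOFS =====

-- the distinct series keys of xs, in first-occurrence order / in sorted order
def pvD (xs : List String) : List String := PySem.List.dedup (xs.map pvKey)
def pvK (xs : List String) : List String := PySem.List.sorted (pvD xs) (fun k => k) false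
-- the group of a key
def pvG (xs : List String) (k : String) : List String := xs.filter (fun a => pvKey a == k)
-- a group turned into (key, element) pairs / into its formatted block
def pvF (g : String → List String) (k : String) : List (String × String) :=
  (g k).map (fun a => (k, a))
def pvBlock (g : String → List String) (k : String) : List String :=
  ("## " ++ k) :: (g k).map (fun item => "  - " ++ item)
-- B's final blank-line step
def pvPost (st : List String × Option String) : List String :=
  if st.2.isSome then st.1 ++ [""] else st.1

theorem pvK_pairwise (xs : List String) : (pvK xs).Pairwise (· < ·) := by
  simpa [pvK, pvD, PySem.List.dedup_eq_ofList] using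
    PySem.List.sorted_ofList_pairwise_lt (xs.map pvKey)

theorem pvK_mem (xs : List String) (k : String) : k ∈ pvK xs ↔ k ∈ xs.map pvKey := by
  simp [pvK, pvD, PySem.List.mem_sorted, PySem.List.dedup_eq_ofList, PySem.Set.mem_ofList]

theorem pvG_ne_nil (xs : List String) (k : String) (h : k ∈ pvK xs) : pvG xs k ≠ [] := by
  rw [pvK_mem] at h
  obtain ⟨a, ha, hk⟩ := List.mem_map.mp h
  exact List.ne_nil_of_mem (List.mem_filter.mpr ⟨ha, by simp [hk]⟩)

theorem pvG_nil_of_not_mem (xs : List String) (k : String) (h : k ∉ pvK xs) : pvG xs k = [] := by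
  rw [pvK_mem] at h
  refine List.filter_eq_nil_iff.mpr ?_
  intro a ha
  exact (Bool.not_eq_true _).mpr (beq_eq_false_iff_ne.mpr (fun hk => h (List.mem_map.mpr ⟨a, ha, hk⟩)))

theorem pv_insertBy_append {α : Type} (before : α → α → Bool) (x : α) (l1 l2 : List α)
    (h : ∀ y ∈ l1, before x y = false) :
    PySem.List.insertBy before x (l1 ++ l2) = l1 ++ PySem.List.insertBy before x l2 := by
  induction l1 with
  | nil => rfl
  | cons y t ih =>
      simp only [List.cons_append, PySem.List.insertBy]
      rw [h y (by simp)]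
      simp [ih (fun z hz => h z (by simp [hz]))]

theorem pv_insertBy_cons_all {α : Type} (before : α → α → Bool) (x : α) (l : List α)
    (h : ∀ y ∈ l, before x y = true) :
    PySem.List.insertBy before x l = x :: l := by
  cases l with
  | nil => simp [PySem.List.insertBy]
  | cons y t => simp [PySem.List.insertBy, h y (by simp)]

theorem pv_flatMap_congr {α β : Type} (l : List α) (f h : α → List β)
    (hfh : ∀ y ∈ l, f y = h y) : l.flatMap f = l.flatMap h := by
  induction l with
  | nil => rfl
  | cons y t ih =>
      simp only [List.flatMap_cons, hfh y (by simp), ih (fun z hz => hfh z (by simp [hz]))]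

theorem pvF_fst (g : String → List String) (k : String) :
    ∀ y ∈ pvF g k, y.1 = k := by
  intro y hy
  obtain ⟨a, _, rfl⟩ := List.mem_map.mp hy
  rfl

-- inserting one (key, value) pair into a key-grouped list appends it to its own group
-- (creating the group at its sorted position when it is new)
theorem pv_ins_grouped (k0 a0 : String) :
    ∀ (K : List String) (g : String → List String),
    K.Pairwise (· < ·) → (k0 ∉ K → g k0 = []) →
    PySem.List.insertBy (fun p q => decide (p.1 < q.1)) (k0, a0) (K.flatMap (pvF g))
      = (if k0 ∈ K then K
         else PySem.List.insertBy (fun a b => decide (a < b)) k0 K).flatMap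
          (pvF (fun k => g k ++ if k0 == k then [a0] else [])) := by
  intro K
  induction K with
  | nil =>
      intro g _ h0
      simp [PySem.List.insertBy, pvF, h0 (by simp)]
  | cons k K' ih =>
      intro g hpw h0
      have hlt := (List.pairwise_cons.mp hpw).1
      have hpw' := (List.pairwise_cons.mp hpw).2
      rcases lt_trichotomy k0 k with hc | hc | hc
      · -- k0 < k : a fresh minimal key, inserted in front
        have hnm : k0 ∉ k :: K' := by
          intro hmem
          rcases List.mem_cons.mp hmem with h | h
          · exact absurd h (ne_of_lt hc)
          · exact lt_irrefl k0 (lt_trans hc (hlt _ h))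
        have hg0 : g k0 = [] := h0 hnm
        have e1 : PySem.List.insertBy (fun p q => decide (p.1 < q.1)) (k0, a0)
            (List.flatMap (pvF g) (k :: K')) = (k0, a0) :: List.flatMap (pvF g) (k :: K') := by
          apply pv_insertBy_cons_all
          intro y hy
          obtain ⟨k', hk', hy'⟩ := List.mem_flatMap.mp hy
          have hy1 : y.1 = k' := pvF_fst g k' y hy'
          rcases List.mem_cons.mp hk' with h | h
          · simp [hy1, h, hc]
          · simp [hy1, lt_trans hc (hlt _ h)]
        have e2 : PySem.List.insertBy (fun a b => decide (a < b)) k0 (k :: K')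
            = k0 :: k :: K' := by
          apply pv_insertBy_cons_all
          intro y hy
          rcases List.mem_cons.mp hy with h | h
          · simp [h, hc]
          · simp [lt_trans hc (hlt _ h)]
        have hcongr : List.flatMap (pvF fun k' => g k' ++ if k0 == k' then [a0] else []) (k :: K')
            = List.flatMap (pvF g) (k :: K') := by
          apply pv_flatMap_congr
          intro k' hk'
          have hne : k0 ≠ k' := fun he => hnm (he ▸ hk')
          simp [pvF, hne]
        rw [e1, if_neg hnm, e2]
        conv_rhs => rw [List.flatMap_cons]
        rw [hcongr]
        simp [pvF, hg0]
      · -- k0 = k : appended at the end of k's group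
        subst hc
        have hnK' : k0 ∉ K' := fun h => lt_irrefl k0 (hlt _ h)
        have hcongr : List.flatMap (pvF fun k' => g k' ++ if k0 == k' then [a0] else []) K'
            = List.flatMap (pvF g) K' := by
          apply pv_flatMap_congr
          intro k' hk'
          have hne : k0 ≠ k' := fun he => hnK' (he ▸ hk')
          simp [pvF, hne]
        rw [List.flatMap_cons]
        rw [pv_insertBy_append _ _ _ _ (by
          intro y hy
          have hy1 : y.1 = k0 := pvF_fst g k0 y hy
          simp [hy1])]
        rw [pv_insertBy_cons_all _ _ _ (by
          intro y hy
          obtain ⟨k', hk', hy'⟩ := List.mem_flatMap.mp hy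
          have hy1 : y.1 = k' := pvF_fst g k' y hy'
          simp [hy1, hlt _ hk'])]
        rw [if_pos List.mem_cons_self]
        conv_rhs => rw [List.flatMap_cons]
        rw [hcongr]
        simp [pvF]
      · -- k < k0 : walk past k's group and recurse
        have hne : k0 ≠ k := ne_of_gt hc
        rw [List.flatMap_cons]
        rw [pv_insertBy_append _ _ _ _ (by
          intro y hy
          have hy1 : y.1 = k := pvF_fst g k y hy
          simp [hy1, not_lt_of_gt hc])]
        rw [ih g hpw' (fun h => h0 (by simp [h, hne]))]
        by_cases hmem : k0 ∈ K'
        · rw [if_pos hmem, if_pos (by simp [hmem])]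
          conv_rhs => rw [List.flatMap_cons]
          simp [pvF, hne]
        · rw [if_neg hmem, if_neg (by simp [hmem, hne])]
          have e3 : PySem.List.insertBy (fun a b => decide (a < b)) k0 (k :: K')
              = k :: PySem.List.insertBy (fun a b => decide (a < b)) k0 K' := by
            simp [PySem.List.insertBy, not_lt_of_gt hc]
          rw [e3]
          conv_rhs => rw [List.flatMap_cons]
          simp [pvF, hne]

theorem pvD_snoc (xs : List String) (a : String) :
    pvD (xs ++ [a]) = PySem.Set.add (pvD xs) (pvKey a) := by
  simp [pvD, PySem.List.dedup_eq_ofList, PySem.Set.ofList_eq_foldl, List.foldl_append]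

theorem pvK_snoc (xs : List String) (a : String) :
    pvK (xs ++ [a]) = if pvKey a ∈ pvK xs then pvK xs
      else PySem.List.insertBy (fun x y => decide (x < y)) (pvKey a) (pvK xs) := by
  by_cases hm : pvKey a ∈ pvK xs
  · rw [if_pos hm]
    have hmD : pvKey a ∈ pvD xs := (PySem.List.mem_sorted _ _ _ _).mp hm
    rw [pvK, pvD_snoc]
    unfold PySem.Set.add
    rw [if_pos ((PySem.Set.contains_iff _ _).mpr hmD)]
    rfl
  · rw [if_neg hm]
    have hmD : pvKey a ∉ pvD xs := fun h => hm ((PySem.List.mem_sorted _ _ _ _).mpr h)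
    have hD : pvD (xs ++ [a]) = pvD xs ++ [pvKey a] := by
      rw [pvD_snoc]
      unfold PySem.Set.add
      rw [if_neg (fun h => hmD ((PySem.Set.contains_iff _ _).mp h))]
    rw [pvK, hD, PySem.List.sorted_eq_foldl_insertBy, List.foldl_append,
      List.foldl_cons, List.foldl_nil, ← PySem.List.sorted_eq_foldl_insertBy]
    rfl

theorem pvG_snoc (xs : List String) (a k : String) :
    pvG (xs ++ [a]) k = pvG xs k ++ if pvKey a == k then [a] else [] := by
  simp [pvG, List.filter_append, List.filter_cons]

-- characterisation of B's sorted pair list: it is the sorted groups, concatenated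
theorem pv_sortedPairs (xs : List String) :
    PySem.List.sorted (xs.map (fun a => (pvKey a, a))) (fun p => p.1) false
      = (pvK xs).flatMap (pvF (pvG xs)) := by
  induction xs using List.reverseRecOn with
  | nil =>
      rw [PySem.List.sorted_eq_foldl_insertBy]
      simp [pvK, pvD, PySem.List.dedup_eq_ofList, PySem.Set.ofList_eq_foldl,
        PySem.List.sorted_eq_foldl_insertBy]
  | append_singleton xs a ih =>
      rw [List.map_append, List.map_cons, List.map_nil,
        PySem.List.sorted_eq_foldl_insertBy, List.foldl_append, List.foldl_cons,
        List.foldl_nil, ← PySem.List.sorted_eq_foldl_insertBy, ih]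
      have hins := pv_ins_grouped (pvKey a) a (pvK xs) (pvG xs) (pvK_pairwise xs)
        (fun h => pvG_nil_of_not_mem xs _ h)
      have hgs : (fun k => pvG xs k ++ if pvKey a == k then [a] else []) = pvG (xs ++ [a]) :=
        funext (fun k => (pvG_snoc xs a k).symm)
      rw [show (PySem.List.insertBy (fun p q => decide (p.1 < q.1)) (pvKey a, a)
          ((pvK xs).flatMap (pvF (pvG xs)))) =
          (if pvKey a ∈ pvK xs then pvK xs
           else PySem.List.insertBy (fun x y => decide (x < y)) (pvKey a) (pvK xs)).flatMap
            (pvF (pvG (xs ++ [a]))) from hgs ▸ hins, ← pvK_snoc]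

-- A's dict items are the first-occurrence keys with their groups
theorem pv_items (xs : List String) :
    (xs.foldl (fun d a => d.modify (pvKey a) [] (fun l => l ++ [a]))
        (PySem.Dict.empty : PySem.Dict String (List String))).items
      = (pvD xs).map (fun k => (k, pvG xs k)) := by
  have hkeys : (xs.foldl (fun d a => d.modify (pvKey a) [] (fun l => l ++ [a]))
      (PySem.Dict.empty : PySem.Dict String (List String))).keys = pvD xs := by
    rw [PySem.Dict.keys_foldl_modify_key]
    simp [PySem.Dict.keys_empty, PySem.Set.update, ← PySem.Set.ofList_eq_foldl, pvD,
      PySem.List.dedup_eq_ofList]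
  have hnd : (xs.foldl (fun d a => d.modify (pvKey a) [] (fun l => l ++ [a]))
      (PySem.Dict.empty : PySem.Dict String (List String))).keys.Nodup :=
    PySem.Dict.nodup_keys_foldl_modify_key _ _ _ _ _ (by simp [PySem.Dict.keys_empty])
  have hget : ∀ k, (xs.foldl (fun d a => d.modify (pvKey a) [] (fun l => l ++ [a]))
      (PySem.Dict.empty : PySem.Dict String (List String))).getD k [] = pvG xs k := by
    intro k
    rw [show xs.foldl (fun d a => d.modify (pvKey a) [] (fun l => l ++ [a]))
        (PySem.Dict.empty : PySem.Dict String (List String))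
        = (xs.map (fun a => (pvKey a, a))).foldl
            (fun d p => d.modify p.1 [] (fun l => l ++ [p.2])) PySem.Dict.empty from
      (List.foldl_map (f := fun a => (pvKey a, a))
        (g := fun d p => d.modify p.1 [] (fun l => l ++ [p.2]))
        (l := xs) (init := PySem.Dict.empty)).symm]
    rw [PySem.Dict.getD_foldl_modify_append]
    simp [pvG, List.filter_map, Function.comp_def]
  rw [PySem.Dict.items_eq_map_keys _ hnd [], hkeys]
  exact List.map_congr_left (fun k _ => by rw [hget k])

-- A = header ++ sorted blocks, each followed by a blank line
theorem pv_A_eq (xs : List String) :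
    format_anomaly_prompt_data_py xs
      = PySem.Str.join "\n"
          ((["Total anomalies detected: " ++ PySem.Int.toStr (Int.ofNat xs.length), ""]) ++
            (pvK xs).flatMap (fun k => pvBlock (pvG xs) k ++ [""])) := by
  simp only [format_anomaly_prompt_data_py]
  rw [pv_items]
  have hsorted : PySem.List.sorted ((pvD xs).map (fun k => (k, pvG xs k))) (fun p => p.1) false
      = (pvK xs).map (fun k => (k, pvG xs k)) := by
    apply PySem.List.sorted_eq_of_perm_of_pairwise_lt
    · exact (PySem.List.sorted_perm (pvD xs) (fun k => k) false).map _
    · exact List.pairwise_map.mpr (by simpa using pvK_pairwise xs)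
  rw [hsorted]
  have hfold : ∀ (L : List (String × List String)) (init : List String),
      L.foldl (fun ps p =>
        (p.2.foldl (fun ps2 item => ps2 ++ ["  - " ++ item]) (ps ++ ["## " ++ p.1])) ++ [""]) init
      = init ++ L.flatMap (fun p =>
          ("## " ++ p.1) :: (p.2.map (fun item => "  - " ++ item) ++ [""])) := by
    intro L
    induction L with
    | nil => simp
    | cons p t ihL =>
        intro init
        rw [List.foldl_cons, PySem.List.foldl_append_singleton_eq_map, ihL]
        simp
  rw [hfold]
  rw [List.flatMap_map]
  exact congrArg
    (fun L => PySem.Str.join "\n"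
      (["Total anomalies detected: " ++ PySem.Int.toStr (Int.ofNat xs.length), ""] ++ L))
    (pv_flatMap_congr (pvK xs)
      (fun a => ("## " ++ (a, pvG xs a).1) ::
        (List.map (fun item => "  - " ++ item) (a, pvG xs a).2 ++ [""]))
      (fun k => pvBlock (pvG xs) k ++ [""])
      (fun k _ => rfl))

-- B's scan of one group's tail items
theorem pv_foldB_items (k : String) (bs : List String) (lines : List String) :
    List.foldl pvStepB (lines, some k) (bs.map (fun a => (k, a)))
      = (lines ++ bs.map (fun item => "  - " ++ item), some k) := by
  induction bs generalizing lines with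
  | nil => simp
  | cons b t ih => simp [pvStepB, ih]

-- B's scan of one whole group
theorem pv_foldB_one (g : String → List String) (k : String) (lines : List String)
    (prev : Option String) (hne : g k ≠ []) (hp : prev ≠ some k) :
    List.foldl pvStepB (lines, prev) (pvF g k)
      = ((if prev.isSome then lines ++ [""] else lines) ++ pvBlock g k, some k) := by
  obtain ⟨b, bs, hbs⟩ := List.exists_cons_of_ne_nil hne
  simp only [pvF, pvBlock, hbs, List.map_cons, List.foldl_cons, pvStepB, hp,
    ne_eq, not_false_iff, if_true, pv_foldB_items]
  simp

-- B's scan of the full grouped list, with the trailing blank from B's last step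
theorem pv_foldB (g : String → List String) :
    ∀ (K : List String), K.Pairwise (· < ·) → (∀ k ∈ K, g k ≠ []) →
    ∀ (lines : List String) (prev : Option String), (∀ k ∈ K, prev ≠ some k) →
    pvPost (List.foldl pvStepB (lines, prev) (K.flatMap (pvF g)))
      = pvPost (lines, prev) ++ K.flatMap (fun k => pvBlock g k ++ [""]) := by
  intro K
  induction K with
  | nil => intro _ _ lines prev _; simp
  | cons k K' ih =>
      intro hpw hne lines prev hprev
      simp only [List.flatMap_cons, List.foldl_append]
      rw [pv_foldB_one g k lines prev (hne k (by simp)) (hprev k (by simp))]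
      rw [ih (List.pairwise_cons.mp hpw).2 (fun x hx => hne x (by simp [hx]))
        _ (some k)
        (fun x hx h => by
          have := (List.pairwise_cons.mp hpw).1 x hx
          simp only [Option.some_inj] at h
          exact absurd h (ne_of_lt this))]
      simp only [pvPost, Option.isSome_some, if_true]
      cases prev <;> simp [List.append_assoc]

-- ===== VERDICT (by name: the statement is the Claim_ definition above) =====
theorem format_anomaly_prompt_data_py_spec : Claim_equal_format_anomaly_prompt_data_py := by
  intro anomalies _
  unfold Spec_format_anomaly_prompt_data_py
  rw [pv_A_eq]
  show PySem.Str.join "\n" _ = _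
  unfold format_anomaly_prompt_data_py_alt
  simp only [pv_sortedPairs]
  have h := pv_foldB (pvG anomalies) (pvK anomalies) (pvK_pairwise anomalies)
    (fun k hk => pvG_ne_nil anomalies k hk)
    (["Total anomalies detected: " ++ PySem.Int.toStr (Int.ofNat anomalies.length), ""]) none
    (by simp)
  simp only [pvPost] at h
  simp only [h]
  simp
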